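-- pv_equiv track=rewrite | github.com/therden/sequential-links-rustler | main.py | get_value_tuples
-- ===== SOURCE A (Python) =====
-- def get_value_tuples(sequence_defs, vals=[]):
--     """
--     Given a list of range definitions, recursively determines all combinations
--     of values that will be used to generate the individual links which they
--     define, returning those as a list of tuples.
--     """
--     try:
--         len(value_tuples)
--     except:
--         value_tuples = []
--     for each in range(*sequence_defs[0]):
--         values_list = [*vals]
--         values_list.append(each)
--         if len(sequence_defs) > 1:
--             next_level = get_value_tuples(sequence_defs[1:], vals=values_list)
--             value_tuples += next_level
--         else:
--             value_tuples.append(tuple(values_list))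
--     return value_tuples
-- ===== SOURCE B (Python) =====
-- def get_value_tuples(sequence_defs, vals=[]):
--     """
--     Iterative re-implementation: build the Cartesian product left-to-right
--     with one fold over the range definitions, instead of recursing on
--     sequence_defs[1:] and copying vals at every level.
--     """
--     combos = [list(vals)]
--     for d in sequence_defs:
--         combos = [c + [x] for c in combos for x in range(*d)]
--     return [tuple(c) for c in combos]
-- ===== Notes on version B (the rewrite author's own statement) =====
-- stated objective: idiomatic
-- what changed: B replaces A's recursion over sequence_defs[1:] (with per-level list copying and accumulator appends) by a single left fold that builds the Cartesian product iteratively with one flat comprehension per range definition.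
import Mathlib
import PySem

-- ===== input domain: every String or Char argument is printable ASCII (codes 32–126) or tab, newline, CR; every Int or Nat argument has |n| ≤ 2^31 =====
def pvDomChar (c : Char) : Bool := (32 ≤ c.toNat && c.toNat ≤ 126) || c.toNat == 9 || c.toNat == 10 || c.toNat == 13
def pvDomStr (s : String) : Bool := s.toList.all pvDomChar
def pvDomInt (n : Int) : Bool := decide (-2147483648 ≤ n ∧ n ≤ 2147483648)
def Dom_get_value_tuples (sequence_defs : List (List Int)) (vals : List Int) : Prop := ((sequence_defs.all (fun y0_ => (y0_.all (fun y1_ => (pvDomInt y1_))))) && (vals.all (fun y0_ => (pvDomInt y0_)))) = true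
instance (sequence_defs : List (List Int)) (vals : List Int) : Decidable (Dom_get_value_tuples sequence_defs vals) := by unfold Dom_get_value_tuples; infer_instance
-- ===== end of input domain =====

-- ===== PORT A =====
-- B changes A's recursion over sequence_defs[1:] into one iterative fold building
-- the product left-to-right (idiomatic/alternative; same output, same order).
-- shared helper: range(*d) for a 1/2/3-element definition list (other arities raise in Python; excluded by Pre_)
def pyRangeStar (d : List Int) : List Int :=
  match d with
  | [b] => PySem.List.pyRange 0 b 1
  | [a, b] => PySem.List.pyRange a b 1
  | [a, b, s] => PySem.List.pyRange a b s
  | _ => []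

-- literal port of A: recursion on sequence_defs, accumulator loop over range(*sequence_defs[0])
def get_value_tuples : List (List Int) → List Int → List (List Int)
  | [], _ => []   -- Python raises IndexError here; excluded by Pre_
  | d :: rest, vals =>
      (pyRangeStar d).foldl
        (fun value_tuples each =>
          let values_list := vals ++ [each]
          if (d :: rest).length > 1 then
            value_tuples ++ get_value_tuples rest values_list
          else
            value_tuples ++ [values_list])
        []

-- ===== PORT B =====
-- literal port of Source B: combos = [list(vals)]; one fold over the definitions;
-- the final [tuple(c) for c in combos] is the identity under the list/tuple convention
def get_value_tuples_alt (sequence_defs : List (List Int)) (vals : List Int) : List (List Int) :=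
  let combos :=
    sequence_defs.foldl
      (fun combos d => combos.flatMap (fun c => (pyRangeStar d).map (fun x => c ++ [x])))
      [vals]
  combos

-- ===== PRECONDITION & SPEC =====
-- Pre_ = exactly where Python A returns: nonempty sequence_defs (else IndexError), and every
-- REACHED definition of arity 1..3 (else TypeError in range(*d)) with nonzero step (else
-- ValueError); a definition after an empty range is never reached, so its shape is free.
-- range(*d) is empty, stated arithmetically (no range is materialised)
def rangeStarEmpty (d : List Int) : Bool :=
  match d with
  | [b] => b ≤ 0
  | [a, b] => b ≤ a
  | [a, b, s] => if 0 < s then b ≤ a else a ≤ b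
  | _ => true

def validRangeDefs : List (List Int) → Bool
  | [] => true
  | d :: rest =>
    (match d with
     | [_] => true
     | [_, _] => true
     | [_, _, s] => s != 0
     | _ => false)
    && (rangeStarEmpty d || validRangeDefs rest)

def Pre_get_value_tuples (sequence_defs : List (List Int)) (vals : List Int) : Prop :=
  sequence_defs ≠ [] ∧ validRangeDefs sequence_defs = true
instance (sequence_defs : List (List Int)) (vals : List Int) : Decidable (Pre_get_value_tuples sequence_defs vals) := by unfold Pre_get_value_tuples; infer_instance
def pvWitness_get_value_tuples : List (List Int) × List Int := ([[1, 3], [2]], [7])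

def Spec_get_value_tuples (sequence_defs : List (List Int)) (vals : List Int) (out : List (List Int)) : Prop := out = get_value_tuples_alt sequence_defs vals
instance (sequence_defs : List (List Int)) (vals : List Int) (out : List (List Int)) : Decidable (Spec_get_value_tuples sequence_defs vals out) := by unfold Spec_get_value_tuples; infer_instance

-- ===== CLAIM (what is proved, stated in full; the proofs are below) =====
def Claim_equal_get_value_tuples : Prop := ∀ (sequence_defs : List (List Int)) (vals : List Int), Dom_get_value_tuples sequence_defs vals → Pre_get_value_tuples sequence_defs vals → Spec_get_value_tuples sequence_defs vals (get_value_tuples sequence_defs vals)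

-- ===== LEMMAS AND PROOFS =====

-- reference shape both ports are proved equal to: the nested Cartesian product
def prodSpec : List (List Int) → List Int → List (List Int)
  | [], vals => [vals]
  | d :: rest, vals => (pyRangeStar d).flatMap (fun x => prodSpec rest (vals ++ [x]))

theorem getA_cons (d : List Int) (rest : List (List Int)) (vals : List Int) :
    get_value_tuples (d :: rest) vals
      = (pyRangeStar d).foldl
          (fun value_tuples each =>
            if (d :: rest).length > 1 then
              value_tuples ++ get_value_tuples rest (vals ++ [each])
            else value_tuples ++ [vals ++ [each]]) [] := rfl

theorem portA_eq_prodSpec (sds : List (List Int)) (h : sds ≠ []) (vals : List Int) :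
    get_value_tuples sds vals = prodSpec sds vals := by
  induction sds generalizing vals with
  | nil => exact absurd rfl h
  | cons d rest ih =>
    cases rest with
    | nil =>
      rw [getA_cons]
      have hfun : (fun (value_tuples : List (List Int)) (each : Int) =>
            if (d :: ([] : List (List Int))).length > 1 then
              value_tuples ++ get_value_tuples [] (vals ++ [each])
            else value_tuples ++ [vals ++ [each]])
          = fun value_tuples each => value_tuples ++ [vals ++ [each]] := by
        funext vt e; simp
      rw [hfun, PySem.List.foldl_append_eq_flatMap]
      simp [prodSpec, List.flatMap_def]
    | cons d2 r2 =>
      rw [getA_cons]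
      have hfun : (fun (value_tuples : List (List Int)) (each : Int) =>
            if (d :: d2 :: r2).length > 1 then
              value_tuples ++ get_value_tuples (d2 :: r2) (vals ++ [each])
            else value_tuples ++ [vals ++ [each]])
          = fun value_tuples each => value_tuples ++ get_value_tuples (d2 :: r2) (vals ++ [each]) := by
        funext vt e; simp
      rw [hfun, PySem.List.foldl_append_eq_flatMap]
      simp only [prodSpec, List.nil_append]
      exact List.flatMap_congr (fun x _ => ih (by simp) (vals ++ [x]))

theorem portB_foldl (sds : List (List Int)) (cs : List (List Int)) :
    sds.foldl (fun combos d => combos.flatMap (fun c => (pyRangeStar d).map (fun x => c ++ [x]))) cs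
      = cs.flatMap (fun c => prodSpec sds c) := by
  induction sds generalizing cs with
  | nil => simp [prodSpec]
  | cons d rest ih =>
    simp only [List.foldl_cons, ih, prodSpec, List.flatMap_assoc, List.flatMap_map]

theorem portB_eq_prodSpec (sds : List (List Int)) (vals : List Int) :
    get_value_tuples_alt sds vals = prodSpec sds vals := by
  simp [get_value_tuples_alt, portB_foldl]

-- ===== VERDICT (by name: the statement is the Claim_ definition above) =====
theorem get_value_tuples_spec : Claim_equal_get_value_tuples := by
  intro sds vals _ hpre
  unfold Spec_get_value_tuples
  rw [portA_eq_prodSpec sds hpre.1 vals, portB_eq_prodSpec]
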